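-- pv_equiv track=rewrite | github.com/walaezzeddine/Persona-Tester | src/agent.py | _sanitize_react_output
-- ===== SOURCE A (Python) =====
-- from typing import Dict, List, Optional, Any
--
-- def _sanitize_react_output(text: str) -> str:
--     """Drop non-ReAct garbage lines once structured output begins."""
--     if not isinstance(text, str):
--         return str(text)
--
--     lines = text.splitlines()
--     cleaned_lines: List[str] = []
--     structured_started = False
--
--     for line in lines:
--         stripped = line.strip()
--         upper = stripped.upper()
--         is_structured = (
--             upper.startswith("THOUGHT:")
--             or (upper.startswith("ACTION:") and not upper.startswith("ACTION_INPUT:"))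
--             or upper.startswith("ACTION_INPUT:")
--             or upper == "DONE"
--         )
--
--         if is_structured:
--             cleaned_lines.append(stripped)
--             structured_started = True
--             continue
--
--         # Ignore trailing garbage (e.g., random tokens) after structured block starts.
--         if structured_started and stripped:
--             continue
--
--         if not structured_started and stripped:
--             cleaned_lines.append(stripped)
--
--     sanitized = "\n".join(cleaned_lines).strip()
--     return sanitized if sanitized else text.strip()
-- ===== SOURCE B (Python) =====
-- def _sanitize_react_output(text: str) -> str:
--     """Drop non-ReAct garbage lines once structured output begins."""
--     if not isinstance(text, str):
--         return str(text)
--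
--     def is_structured(s: str) -> bool:
--         u = s.upper()
--         return (
--             u.startswith("THOUGHT:")
--             or (u.startswith("ACTION:") and not u.startswith("ACTION_INPUT:"))
--             or u.startswith("ACTION_INPUT:")
--             or u == "DONE"
--         )
--
--     # One backwards pass: for each suffix of the line list keep BOTH possible
--     # cleaned results -- `after`: cleaned suffix given structured output already
--     # began; `fresh`: cleaned suffix given it has not begun yet.  The answer for
--     # the whole text is `fresh` of the full suffix.
--     after: list = []
--     fresh: list = []
--     for line in reversed(text.splitlines()):
--         s = line.strip()
--         if is_structured(s):
--             after = [s] + after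
--             fresh = after
--         elif s:
--             fresh = [s] + fresh
--
--     sanitized = "\n".join(fresh).strip()
--     return sanitized if sanitized else text.strip()
-- ===== Notes on version B (the rewrite author's own statement) =====
-- stated objective: alternative
-- what changed: Replaces A's forward loop with a structured_started flag by a single backwards traversal (right fold) that carries two candidate cleaned suffixes -- one assuming structured output already began, one assuming it has not -- and returns the latter; the mutable flag disappears.
import Mathlib
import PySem

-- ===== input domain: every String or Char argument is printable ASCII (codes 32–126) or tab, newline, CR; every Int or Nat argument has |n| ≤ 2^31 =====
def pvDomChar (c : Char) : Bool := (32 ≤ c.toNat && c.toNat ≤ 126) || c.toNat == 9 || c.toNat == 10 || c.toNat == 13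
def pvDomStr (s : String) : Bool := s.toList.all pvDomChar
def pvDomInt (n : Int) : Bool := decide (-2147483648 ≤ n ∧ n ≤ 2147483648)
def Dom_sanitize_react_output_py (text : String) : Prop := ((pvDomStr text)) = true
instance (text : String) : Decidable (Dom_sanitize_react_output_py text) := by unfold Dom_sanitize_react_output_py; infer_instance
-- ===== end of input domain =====

-- B replaces A's forward flag-driven loop with one backwards pass (right fold) carrying
-- two candidate cleaned suffixes (alternative decomposition, same cost); return values proved equal on all inputs.

-- ===== PORT A =====
-- A's loop, transliterated: state = (cleaned_lines, structured_started), branches in source order.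
def pvALoop : List String → List String → Bool → List String
  | [], cleaned, _ => cleaned
  | line :: rest, cleaned, started =>
    let stripped := PySem.Str.strip line
    let upper := PySem.Str.upper stripped
    let is_structured :=
      PySem.Str.startswith upper "THOUGHT:"
      || (PySem.Str.startswith upper "ACTION:" && !PySem.Str.startswith upper "ACTION_INPUT:")
      || PySem.Str.startswith upper "ACTION_INPUT:"
      || (upper == "DONE")
    if is_structured then pvALoop rest (cleaned ++ [stripped]) true
    else if started && stripped != "" then pvALoop rest cleaned started
    else if !started && stripped != "" then pvALoop rest (cleaned ++ [stripped]) started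
    else pvALoop rest cleaned started

def sanitize_react_output_py (text : String) : String :=
  let lines := PySem.Str.splitlines text
  let cleaned_lines := pvALoop lines [] false
  let sanitized := PySem.Str.strip (PySem.Str.join "\n" cleaned_lines)
  if sanitized != "" then sanitized else PySem.Str.strip text

-- ===== PORT B =====
def pvIsStructured (s : String) : Bool :=
  let u := PySem.Str.upper s
  PySem.Str.startswith u "THOUGHT:"
  || (PySem.Str.startswith u "ACTION:" && !PySem.Str.startswith u "ACTION_INPUT:")
  || PySem.Str.startswith u "ACTION_INPUT:"
  || (u == "DONE")

-- one backwards step: acc = (after, fresh) for the suffix already processed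
def pvBStep (line : String) (acc : List String × List String) : List String × List String :=
  let s := PySem.Str.strip line
  if pvIsStructured s then (s :: acc.1, s :: acc.1)
  else if s != "" then (acc.1, s :: acc.2)
  else acc

def sanitize_react_output_py_alt (text : String) : String :=
  let res := (PySem.Str.splitlines text).foldr pvBStep ([], [])
  let sanitized := PySem.Str.strip (PySem.Str.join "\n" res.2)
  if sanitized != "" then sanitized else PySem.Str.strip text

-- ===== PRECONDITION & SPEC =====
def Spec_sanitize_react_output_py (text : String) (out : String) : Prop := out = sanitize_react_output_py_alt text
instance (text : String) (out : String) : Decidable (Spec_sanitize_react_output_py text out) := by unfold Spec_sanitize_react_output_py; infer_instance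

-- ===== CLAIM (what is proved, stated in full; the proofs are below) =====
def Claim_equal_sanitize_react_output_py : Prop := ∀ (text : String), Dom_sanitize_react_output_py text → Spec_sanitize_react_output_py text (sanitize_react_output_py text)

-- ===== LEMMAS AND PROOFS =====

-- invariant: A's loop from state `started` equals `cleaned` ++ the corresponding
-- component of B's right fold over the remaining lines
theorem pvALoop_eq_foldr (ls : List String) : ∀ cleaned,
    pvALoop ls cleaned true = cleaned ++ (ls.foldr pvBStep ([], [])).1
    ∧ pvALoop ls cleaned false = cleaned ++ (ls.foldr pvBStep ([], [])).2 := by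
  induction ls with
  | nil => simp [pvALoop]
  | cons l rest ih =>
    intro cleaned
    simp only [pvALoop, List.foldr_cons]
    by_cases h : pvIsStructured (PySem.Str.strip l) = true
    · have h' := h; simp only [pvIsStructured] at h'
      simp only [h', pvBStep, h, if_true, (ih (cleaned ++ [PySem.Str.strip l])).1]
      simp
    · have h' := h; simp only [pvIsStructured] at h'
      simp only [h', Bool.false_eq_true, if_false, pvBStep, h]
      by_cases he : (PySem.Str.strip l != "") = true
      · simp only [he, if_true]
        constructor
        · simp [(ih cleaned).1]
        · simp [(ih (cleaned ++ [PySem.Str.strip l])).2]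
      · simp only [he, Bool.false_eq_true, if_false]
        simp_all [ih cleaned]

-- ===== VERDICT (by name: the statement is the Claim_ definition above) =====
theorem sanitize_react_output_py_spec : Claim_equal_sanitize_react_output_py := by
  intro text _
  show sanitize_react_output_py text = sanitize_react_output_py_alt text
  simp only [sanitize_react_output_py, sanitize_react_output_py_alt,
    (pvALoop_eq_foldr (PySem.Str.splitlines text) []).2, List.nil_append]
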